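-- pv_equiv track=rewrite | github.com/JarretNachtigal/python-sandbox | minion_game.py | get_vowel_substrings
-- ===== SOURCE A (Python) =====
-- def get_vowel_substrings(string):
--     vowels = ["A", "E", "I", "O", 'U']
--     substrings = []
--     length = len(string)
--     for letter in vowels:  # loop through vowels to check if they exist
--         if string.count(letter) > 0:  # if they exist
--             substrings.append(letter)  # add vowel to substrings
--             i = string.index(letter) + 1  # set i to index of vowel + 1
--             while i < length:  # add remaining substrings after the vowel
--                 # add previous substring + next letter
--                 substrings.append(substrings[len(substrings) - 1] + string[i])
--                 i += 1
--
--     return substrings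
-- ===== SOURCE B (Python) =====
-- def get_vowel_substrings(string):
--     substrings = []
--     for v in "AEIOU":
--         idx = string.find(v)
--         if idx != -1:
--             for j in range(idx + 1, len(string) + 1):
--                 substrings.append(string[idx:j])
--     return substrings
-- ===== Notes on version B (the rewrite author's own statement) =====
-- stated objective: simpler
-- what changed: Each prefix-substring is built independently by slicing string[idx:j] over a range, instead of growing an accumulator list and concatenating its last element with the next character; the count()>0 guard becomes find() != -1.
import Mathlib
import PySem

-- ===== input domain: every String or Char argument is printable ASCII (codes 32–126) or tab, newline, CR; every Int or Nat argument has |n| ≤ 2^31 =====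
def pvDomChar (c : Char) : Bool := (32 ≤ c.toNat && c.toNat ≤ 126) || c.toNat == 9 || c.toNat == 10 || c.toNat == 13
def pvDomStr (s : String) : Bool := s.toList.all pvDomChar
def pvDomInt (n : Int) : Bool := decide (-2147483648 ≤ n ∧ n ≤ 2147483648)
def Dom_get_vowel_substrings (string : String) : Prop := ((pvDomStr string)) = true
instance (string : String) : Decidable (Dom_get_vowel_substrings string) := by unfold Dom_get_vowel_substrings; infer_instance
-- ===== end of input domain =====

set_option maxRecDepth 4000


-- B builds each prefix-substring independently as a slice string[idx:j] instead of
-- extending the previously appended string by one character (simpler; return value only).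

-- ===== PORT A =====
-- the inner 'while i < length' loop of A: append substrings[-1] + string[i], i += 1
def pvA_while (cs : List Char) (i : Nat) (substrings : List (List Char)) : List (List Char) :=
  if _h : i < cs.length then
    pvA_while cs (i + 1)
      (substrings ++ [substrings.getD (substrings.length - 1) [] ++ [cs.getD i ' ']])
  else substrings
termination_by cs.length - i

-- one iteration of A's outer 'for letter in vowels' loop
def pvA_step (cs : List Char) (substrings : List (List Char)) (letter : Char) : List (List Char) :=
  if PySem.Chars.count cs [letter] > 0 then
    pvA_while cs ((PySem.Chars.find cs [letter]).toNat + 1) (substrings ++ [[letter]])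
  else substrings

def get_vowel_substrings (string : String) : List String :=
  ((['A', 'E', 'I', 'O', 'U']).foldl (pvA_step string.toList) []).map String.ofList

-- ===== PORT B =====
-- one iteration of B's 'for v in "AEIOU"' loop: slices string[idx:j] for j in range(idx+1, len+1)
def pvB_step (cs : List Char) (substrings : List String) (v : Char) : List String :=
  let idx := PySem.Chars.find cs [v]
  if idx ≠ -1 then
    substrings ++ (PySem.List.pyRange (idx + 1) ((cs.length : Int) + 1) 1).map
      (fun j => String.ofList (PySem.List.slice cs (some idx) (some j)))
  else substrings

def get_vowel_substrings_alt (string : String) : List String :=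
  (['A', 'E', 'I', 'O', 'U']).foldl (pvB_step string.toList) []

-- ===== PRECONDITION & SPEC =====
def Spec_get_vowel_substrings (string : String) (out : List String) : Prop := out = get_vowel_substrings_alt string
instance (string : String) (out : List String) : Decidable (Spec_get_vowel_substrings string out) := by unfold Spec_get_vowel_substrings; infer_instance

-- ===== CLAIM (what is proved, stated in full; the proofs are below) =====
def Claim_equal_get_vowel_substrings : Prop := ∀ (string : String), Dom_get_vowel_substrings string → Spec_get_vowel_substrings string (get_vowel_substrings string)

-- ===== LEMMAS AND PROOFS =====

theorem pv_count_go_ge (v : Char) : ∀ (fuel : Nat) (s : List Char) (acc : Nat),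
    acc ≤ PySem.Chars.count.go [v] fuel s acc := by
  intro fuel
  induction fuel with
  | zero => intro s acc; cases s <;> simp [PySem.Chars.count.go]
  | succ n ih =>
    intro s acc
    cases s with
    | nil => simp [PySem.Chars.count.go]
    | cons h t =>
      simp only [PySem.Chars.count.go]
      split
      · exact le_trans (Nat.le_succ acc) (ih _ _)
      · exact ih _ _

theorem pv_count_go_pos_iff (v : Char) : ∀ (fuel : Nat) (s : List Char) (acc : Nat),
    s.length ≤ fuel → (acc < PySem.Chars.count.go [v] fuel s acc ↔ v ∈ s) := by
  intro fuel
  induction fuel with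
  | zero =>
    intro s acc hs
    have : s = [] := List.eq_nil_of_length_eq_zero (Nat.le_zero.mp hs)
    subst this; simp [PySem.Chars.count.go]
  | succ n ih =>
    intro s acc hs
    cases s with
    | nil => simp [PySem.Chars.count.go]
    | cons h t =>
      simp only [PySem.Chars.count.go]
      by_cases hv : v = h
      · subst hv
        simp only [List.isPrefixOf, BEq.rfl, Bool.and_self, if_pos]
        constructor
        · intro _; exact List.mem_cons_self
        · intro _
          calc acc < acc + 1 := Nat.lt_succ_self acc
            _ ≤ _ := pv_count_go_ge v n _ (acc + 1)
      · have hpref : ([v].isPrefixOf (h :: t)) = false := by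
          simp [List.isPrefixOf, hv]
        simp only [hpref, Bool.false_eq_true, if_false]
        rw [ih t acc (by simpa using Nat.le_of_succ_le_succ hs)]
        simp [List.mem_cons, hv]

theorem pv_count_pos_iff (cs : List Char) (v : Char) :
    0 < PySem.Chars.count cs [v] ↔ v ∈ cs := by
  unfold PySem.Chars.count
  simp only [List.isEmpty]
  exact pv_count_go_pos_iff v cs.length cs 0 le_rfl

theorem pv_singleton_infix (v : Char) (cs : List Char) : [v] <:+: cs ↔ v ∈ cs := by
  constructor
  · rintro ⟨p, q, rfl⟩; simp
  · intro hv
    obtain ⟨p, q, rfl⟩ := List.append_of_mem hv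
    exact ⟨p, q, by simp⟩

theorem pv_while_spec (cs : List Char) : ∀ (n i : Nat) (acc : List (List Char)) (pre : List Char),
    cs.length - i = n →
    pvA_while cs i (acc ++ [pre]) =
      (acc ++ [pre]) ++ (List.range n).map (fun t => pre ++ ((cs.drop i).take (t + 1))) := by
  intro n
  induction n with
  | zero =>
    intro i acc pre h
    have hi : ¬ i < cs.length := by omega
    rw [pvA_while]
    simp [hi]
  | succ n ih =>
    intro i acc pre h
    have hi : i < cs.length := by omega
    rw [pvA_while]
    simp only [hi, dif_pos]
    have hlast : (acc ++ [pre]).getD ((acc ++ [pre]).length - 1) [] = pre := by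
      simp [List.getD]
    have hget : cs.getD i ' ' = cs[i] := List.getD_eq_getElem cs ' ' hi
    rw [hlast, hget]
    rw [show acc ++ [pre] ++ [pre ++ [cs[i]]] = (acc ++ [pre]) ++ [pre ++ [cs[i]]] from rfl,
        ih (i + 1) (acc ++ [pre]) (pre ++ [cs[i]]) (by omega)]
    have hdrop : cs.drop i = cs[i] :: cs.drop (i + 1) := List.drop_eq_getElem_cons hi
    rw [List.range_succ_eq_map, List.map_cons, List.map_map]
    rw [hdrop]
    simp only [List.take_succ_cons, List.take_zero, Function.comp_def, List.append_assoc]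
    rfl

theorem pv_step_eq (cs : List Char) (acc : List (List Char)) (v : Char) :
    (pvA_step cs acc v).map String.ofList = pvB_step cs (acc.map String.ofList) v := by
  unfold pvA_step pvB_step
  by_cases hc : 0 < PySem.Chars.count cs [v]
  · have hv : v ∈ cs := (pv_count_pos_iff cs v).mp hc
    have hinf : [v] <:+: cs := (pv_singleton_infix v cs).mpr hv
    have hne : PySem.Chars.find cs [v] ≠ -1 := (PySem.Chars.find_ne_neg_one_iff cs [v]).mpr hinf
    have hnn : 0 ≤ PySem.Chars.find cs [v] := (PySem.Chars.find_nonneg_iff cs [v]).mpr hinf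
    set idx := PySem.Chars.find cs [v] with hidx
    set k := idx.toNat with hk
    have hspec := (PySem.Chars.find_spec (s := cs) (sub := [v]) hnn).1
    obtain ⟨rest, hrest⟩ : ∃ rest, cs.drop k = v :: rest := by
      obtain ⟨t, ht⟩ := hspec
      exact ⟨t, by simpa using ht.symm⟩
    have hklt : k < cs.length := by
      by_contra hge
      rw [List.drop_eq_nil_of_le (by omega)] at hrest
      simp at hrest
    simp only [hc, if_pos, hne, ne_eq, not_false_eq_true, if_pos]
    -- A side via the while-loop characterisation
    rw [show idx.toNat + 1 = k + 1 from rfl,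
        pv_while_spec cs (cs.length - (k + 1)) (k + 1) acc [v] rfl]
    -- B side: pyRange closed form and slices as drop/take
    rw [PySem.List.pyRange_one (idx + 1) ((cs.length : Int) + 1)]
    have hcnt : ((cs.length : Int) + 1 - (idx + 1)).toNat = cs.length - k := by omega
    rw [hcnt]
    have hsl : ∀ t : Nat, PySem.List.slice cs (some idx) (some (idx + 1 + (t : Int))) =
        (cs.drop k).take (t + 1) := by
      intro t
      rw [PySem.List.slice_toNat cs hnn (by omega)]
      congr 1
      omega
    have hdropk1 : cs.drop (k + 1) = rest := by
      have h1 : (cs.drop k).drop 1 = rest := by rw [hrest]; rfl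
      rw [List.drop_drop] at h1
      simpa [Nat.add_comm] using h1
    have hlen : cs.length - k = (cs.length - (k + 1)) + 1 := by omega
    have key : (List.range (cs.length - k)).map
          (fun t : Nat => String.ofList (PySem.List.slice cs (some idx) (some (idx + 1 + (t : Int))))) =
        String.ofList [v] ::
          (List.range (cs.length - (k + 1))).map
            (fun t => String.ofList ([v] ++ (cs.drop (k + 1)).take (t + 1))) := by
      rw [hlen, List.range_succ_eq_map, List.map_cons, List.map_map]
      congr 1
      · have h0 := hsl 0
        push_cast at h0 ⊢
        rw [h0, hrest]
        rfl
      · apply List.map_congr_left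
        intro t _
        simp only [Function.comp_apply, hsl]
        rw [hrest, hdropk1]
        simp [List.take_succ_cons]
    rw [List.map_append, List.map_map, List.map_map]
    simp only [Function.comp_def]
    rw [key]
    simp [List.append_assoc]
  · have hnmem : v ∉ cs := fun hv => hc ((pv_count_pos_iff cs v).mpr hv)
    have heq : PySem.Chars.find cs [v] = -1 :=
      (PySem.Chars.find_eq_neg_one_iff cs [v]).mpr
        (fun hinf => hnmem ((pv_singleton_infix v cs).mp hinf))
    simp [hc, heq]

theorem pv_foldl_eq (cs : List Char) : ∀ (vs : List Char) (acc : List (List Char)),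
    (vs.foldl (pvA_step cs) acc).map String.ofList = vs.foldl (pvB_step cs) (acc.map String.ofList) := by
  intro vs
  induction vs with
  | nil => intro acc; rfl
  | cons v vs ih =>
    intro acc
    simp only [List.foldl_cons]
    rw [ih (pvA_step cs acc v), pv_step_eq]

-- ===== VERDICT (by name: the statement is the Claim_ definition above) =====
theorem get_vowel_substrings_spec : Claim_equal_get_vowel_substrings := by
  intro string _
  unfold Spec_get_vowel_substrings get_vowel_substrings get_vowel_substrings_alt
  exact pv_foldl_eq string.toList ['A', 'E', 'I', 'O', 'U'] []
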